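-- pv_equiv track=rewrite | github.com/pandas-dev/pandas | venv/lib/python3.12/site-packages/botocore/compat.py | _windows_shell_split
-- ===== SOURCE A (Python) =====
-- from math import floor
--
-- def _windows_shell_split(s):
--     """Splits up a windows command as the built-in command parser would.
--
--     Windows has potentially bizarre rules depending on where you look. When
--     spawning a process via the Windows C runtime (which is what python does
--     when you call popen) the rules are as follows:
--
--     https://docs.microsoft.com/en-us/cpp/cpp/parsing-cpp-command-line-arguments
--
--     To summarize:
--
--     * Only space and tab are valid delimiters
--     * Double quotes are the only valid quotes
--     * Backslash is interpreted literally unless it is part of a chain that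
--       leads up to a double quote. Then the backslashes escape the backslashes,
--       and if there is an odd number the final backslash escapes the quote.
--
--     :param s: The command string to split up into parts.
--     :return: A list of command components.
--     """
--     if not s:
--         return []
--
--     components = []
--     buff = []
--     is_quoted = False
--     num_backslashes = 0
--     for character in s:
--         if character == '\\':
--             # We can't simply append backslashes because we don't know if
--             # they are being used as escape characters or not. Instead we
--             # keep track of how many we've encountered and handle them when
--             # we encounter a different character.
--             num_backslashes += 1
--         elif character == '"':
--             if num_backslashes > 0:
--                 # The backslashes are in a chain leading up to a double
--                 # quote, so they are escaping each other.
--                 buff.append('\\' * int(floor(num_backslashes / 2)))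
--                 remainder = num_backslashes % 2
--                 num_backslashes = 0
--                 if remainder == 1:
--                     # The number of backslashes is uneven, so they are also
--                     # escaping the double quote, so it needs to be added to
--                     # the current component buffer.
--                     buff.append('"')
--                     continue
--
--             # We've encountered a double quote that is not escaped,
--             # so we toggle is_quoted.
--             is_quoted = not is_quoted
--
--             # If there are quotes, then we may want an empty string. To be
--             # safe, we add an empty string to the buffer so that we make
--             # sure it sticks around if there's nothing else between quotes.
--             # If there is other stuff between quotes, the empty string will
--             # disappear during the joining process.
--             buff.append('')
--         elif character in [' ', '\t'] and not is_quoted: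
--             # Since the backslashes aren't leading up to a quote, we put in
--             # the exact number of backslashes.
--             if num_backslashes > 0:
--                 buff.append('\\' * num_backslashes)
--                 num_backslashes = 0
--
--             # Excess whitespace is ignored, so only add the components list
--             # if there is anything in the buffer.
--             if buff:
--                 components.append(''.join(buff))
--                 buff = []
--         else:
--             # Since the backslashes aren't leading up to a quote, we put in
--             # the exact number of backslashes.
--             if num_backslashes > 0:
--                 buff.append('\\' * num_backslashes)
--                 num_backslashes = 0
--             buff.append(character)
--
--     # Quotes must be terminated.
--     if is_quoted:
--         raise ValueError(f"No closing quotation in string: {s}")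
--
--     # There may be some leftover backslashes, so we need to add them in.
--     # There's no quote so we add the exact number.
--     if num_backslashes > 0:
--         buff.append('\\' * num_backslashes)
--
--     # Add the final component in if there is anything in the buffer.
--     if buff:
--         components.append(''.join(buff))
--
--     return components
-- ===== SOURCE B (Python) =====
-- def _windows_shell_split(s):
--     components = []
--     buff = []
--     quoted = False
--     i = 0
--     n = len(s)
--     while i < n:
--         ch = s[i]
--         if ch == '\\':
--             j = i
--             while j < n and s[j] == '\\':
--                 j += 1
--             run = j - i
--             if j < n and s[j] == '"':
--                 buff.append('\\' * (run // 2))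
--                 if run % 2 == 1:
--                     buff.append('"')
--                 else:
--                     quoted = not quoted
--                     buff.append('')
--                 i = j + 1
--             else:
--                 buff.append('\\' * run)
--                 i = j
--         elif ch == '"':
--             quoted = not quoted
--             buff.append('')
--             i += 1
--         elif ch in ' \t' and not quoted:
--             if buff:
--                 components.append(''.join(buff))
--                 buff = []
--             i += 1
--         else:
--             buff.append(ch)
--             i += 1
--     if quoted:
--         raise ValueError(f"No closing quotation in string: {s}")
--     if buff:
--         components.append(''.join(buff))
--     return components
-- ===== Notes on version B (the rewrite author's own statement) =====
-- stated objective: alternative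
-- what changed: Replaces A's character-by-character for-loop with a persistent num_backslashes accumulator by an explicit-index while-loop that consumes each backslash run in one inner scan and then looks ahead one character to decide quote-escaping; same O(n) cost, different traversal and state.
-- outside the precondition, e.g. on _windows_shell_split('"abc'): A raises ValueError, B raises ValueError
import Mathlib
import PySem

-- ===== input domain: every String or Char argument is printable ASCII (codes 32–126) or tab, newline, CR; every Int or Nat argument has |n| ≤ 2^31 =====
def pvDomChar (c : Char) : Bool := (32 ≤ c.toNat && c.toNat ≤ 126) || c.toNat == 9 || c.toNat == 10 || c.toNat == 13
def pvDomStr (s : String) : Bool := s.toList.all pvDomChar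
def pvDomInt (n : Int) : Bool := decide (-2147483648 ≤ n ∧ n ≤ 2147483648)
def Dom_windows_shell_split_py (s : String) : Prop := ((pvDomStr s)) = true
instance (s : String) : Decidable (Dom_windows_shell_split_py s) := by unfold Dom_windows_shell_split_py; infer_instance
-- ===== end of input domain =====

-- B replaces A's character-by-character fold with a persistent backslash counter by an
-- index/run while-loop that consumes each backslash run at once (objective: alternative).
-- Both Pythons raise ValueError on an unterminated quote; Pre_ excludes exactly those inputs.

-- ===== PORT A =====
-- one step of A's for-loop; state = (components, buff, is_quoted, num_backslashes)
def pvStepA (st : List String × List String × Bool × Nat) (c : Char) :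
    List String × List String × Bool × Nat :=
  let (comps, buff, q, nb) := st
  if c = '\\' then (comps, buff, q, nb + 1)
  else if c = '"' then
    if 0 < nb then
      let buff' := buff ++ [String.ofList (List.replicate (nb / 2) '\\')]
      if nb % 2 = 1 then (comps, buff' ++ ["\""], q, 0)
      else (comps, buff' ++ [""], !q, 0)
    else (comps, buff ++ [""], !q, 0)
  else if (c = ' ' ∨ c = '\t') ∧ q = false then
    let buff' := if 0 < nb then buff ++ [String.ofList (List.replicate nb '\\')] else buff
    if buff'.isEmpty then (comps, [], q, 0)
    else (comps ++ [String.join buff'], [], q, 0)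
  else
    let buff' := if 0 < nb then buff ++ [String.ofList (List.replicate nb '\\')] else buff
    (comps, buff' ++ [String.ofList [c]], q, 0)

-- A's code after the loop (the ValueError case is excluded by Pre_; there the port's
-- value is unconstrained and we simply return the components built so far)
def pvFinishA (st : List String × List String × Bool × Nat) : List String :=
  let (comps, buff, _q, nb) := st
  let buff' := if 0 < nb then buff ++ [String.ofList (List.replicate nb '\\')] else buff
  if buff'.isEmpty then comps else comps ++ [String.join buff']

def windows_shell_split_py (s : String) : List String :=
  if s.toList.isEmpty then []
  else pvFinishA (s.toList.foldl pvStepA ([], [], false, 0))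

-- ===== PORT B =====
-- B's while-loop: recursion on the remaining characters, consuming whole backslash runs
def pvGoB (l : List Char) (comps buff : List String) (q : Bool) : List String :=
  match l with
  | [] => if buff.isEmpty then comps else comps ++ [String.join buff]
  | c :: rest =>
    if c = '\\' then
      let run := 1 + (rest.takeWhile (· == '\\')).length
      let rest' := rest.dropWhile (· == '\\')
      if rest'.head? = some '"' then
        let buff' := buff ++ [String.ofList (List.replicate (run / 2) '\\')]
        if run % 2 = 1 then pvGoB rest'.tail comps (buff' ++ ["\""]) q
        else pvGoB rest'.tail comps (buff' ++ [""]) (!q)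
      else pvGoB rest' comps (buff ++ [String.ofList (List.replicate run '\\')]) q
    else if c = '"' then pvGoB rest comps (buff ++ [""]) (!q)
    else if (c = ' ' ∨ c = '\t') ∧ q = false then
      if buff.isEmpty then pvGoB rest comps [] q
      else pvGoB rest (comps ++ [String.join buff]) [] q
    else pvGoB rest comps (buff ++ [String.ofList [c]]) q
  termination_by l.length
  decreasing_by
  all_goals
    (have h1 : (List.dropWhile (fun x => x == '\\') rest).length ≤ rest.length :=
      List.length_dropWhile_le ..
     simp <;> omega)

def windows_shell_split_py_alt (s : String) : List String :=
  pvGoB s.toList [] [] false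

-- ===== PRECONDITION & SPEC =====
-- Pre_ excludes exactly the inputs with an odd number of unescaped double quotes
-- (a quote preceded by an even-length backslash run), on which the Python A raises
-- an unterminated-quote ValueError.
def Pre_windows_shell_split_py (s : String) : Prop :=
  ((List.range s.toList.length).filter (fun i =>
      s.toList.getD i ' ' == '"' &&
      ((s.toList.take i).reverse.takeWhile (· == '\\')).length % 2 == 0)).length % 2 = 0
instance (s : String) : Decidable (Pre_windows_shell_split_py s) := by
  unfold Pre_windows_shell_split_py; infer_instance

def pvWitness_windows_shell_split_py : String := "ab \\\"c \"d e\""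

def Spec_windows_shell_split_py (s : String) (out : List String) : Prop := out = windows_shell_split_py_alt s
instance (s : String) (out : List String) : Decidable (Spec_windows_shell_split_py s out) := by unfold Spec_windows_shell_split_py; infer_instance

-- ===== CLAIM (what is proved, stated in full; the proofs are below) =====
def Claim_equal_windows_shell_split_py : Prop := ∀ (s : String), Dom_windows_shell_split_py s → Pre_windows_shell_split_py s → Spec_windows_shell_split_py s (windows_shell_split_py s)

-- ===== LEMMAS AND PROOFS =====

theorem pv_takeWhile_repl_cons (k : Nat) (c : Char) (t : List Char) (hc : c ≠ '\\') :
    (List.replicate k '\\' ++ c :: t).takeWhile (· == '\\') = List.replicate k '\\' := by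
  induction k with
  | zero => simp [hc]
  | succ n ih => simp [List.replicate_succ, ih]

theorem pv_dropWhile_repl_cons (k : Nat) (c : Char) (t : List Char) (hc : c ≠ '\\') :
    (List.replicate k '\\' ++ c :: t).dropWhile (· == '\\') = c :: t := by
  induction k with
  | zero => simp [hc]
  | succ n ih => simp [List.replicate_succ, ih]

theorem pv_key : ∀ (l : List Char) (comps buff : List String) (q : Bool) (nb : Nat),
    pvFinishA (l.foldl pvStepA (comps, buff, q, nb)) =
      pvGoB (List.replicate nb '\\' ++ l) comps buff q := by
  intro l
  induction l with
  | nil =>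
    intro comps buff q nb
    cases nb with
    | zero => simp [pvFinishA, pvGoB]
    | succ k =>
      simp only [List.foldl_nil, List.append_nil, List.replicate_succ]
      simp [pvFinishA, pvGoB, Nat.add_comm 1 k]
  | cons c t ih =>
    intro comps buff q nb
    by_cases hc : c = '\\'
    · subst hc
      have hl : List.replicate nb '\\' ++ '\\' :: t = List.replicate (nb + 1) '\\' ++ t := by
        simp [List.replicate_succ']
      rw [hl]
      simp only [List.foldl_cons, pvStepA]
      simpa using ih comps buff q (nb + 1)
    · -- c is not a backslash
      cases nb with
      | zero =>
        rw [List.replicate_zero, List.nil_append, pvGoB, if_neg hc]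
        by_cases hq : c = '"'
        · subst hq
          rw [if_pos rfl]
          have h := ih comps (buff ++ [""]) (!q) 0
          simp only [List.replicate_zero, List.nil_append] at h
          simp only [List.foldl_cons, pvStepA]
          simpa using h
        · rw [if_neg hq]
          by_cases hsp : (c = ' ' ∨ c = '\t') ∧ q = false
          · rw [if_pos hsp]
            simp only [List.foldl_cons, pvStepA, if_neg hc, if_neg hq, if_pos hsp]
            by_cases hb : buff.isEmpty
            · rw [if_pos hb]
              have h := ih comps [] q 0
              simp only [List.replicate_zero, List.nil_append] at h
              simpa [hb] using h
            · rw [if_neg hb]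
              have h := ih (comps ++ [String.join buff]) [] q 0
              simp only [List.replicate_zero, List.nil_append] at h
              simpa [hb] using h
          · rw [if_neg hsp]
            simp only [List.foldl_cons, pvStepA, if_neg hc, if_neg hq, if_neg hsp]
            have h := ih comps (buff ++ [String.ofList [c]]) q 0
            simp only [List.replicate_zero, List.nil_append] at h
            simpa using h
      | succ k =>
        have hl : List.replicate (k+1) '\\' ++ c :: t = '\\' :: (List.replicate k '\\' ++ c :: t) := by
          simp [List.replicate_succ]
        rw [hl, pvGoB, if_pos rfl]
        simp only [pv_takeWhile_repl_cons k c t hc, pv_dropWhile_repl_cons k c t hc,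
          List.length_replicate, List.head?_cons, List.tail_cons, Nat.add_comm 1 k]
        by_cases hq : c = '"'
        · subst hq
          rw [if_pos rfl]
          simp only [List.foldl_cons, pvStepA]
          by_cases hpar : (k + 1) % 2 = 1
          · rw [if_pos hpar]
            have h := ih comps ((buff ++ [String.ofList (List.replicate ((k+1)/2) '\\')]) ++ ["\""]) q 0
            simp only [List.replicate_zero, List.nil_append] at h
            simpa [hpar] using h
          · rw [if_neg hpar]
            have h := ih comps ((buff ++ [String.ofList (List.replicate ((k+1)/2) '\\')]) ++ [""]) (!q) 0
            simp only [List.replicate_zero, List.nil_append] at h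
            simpa [hpar] using h
        · rw [if_neg (by simpa using hq)]
          rw [pvGoB, if_neg hc, if_neg hq]
          by_cases hsp : (c = ' ' ∨ c = '\t') ∧ q = false
          · rw [if_pos hsp]
            simp only [List.foldl_cons, pvStepA, if_neg hc, if_neg hq, if_pos hsp]
            rw [if_neg (by simp : ¬ (buff ++ [String.ofList (List.replicate (k+1) '\\')]).isEmpty = true)]
            have h := ih (comps ++ [String.join (buff ++ [String.ofList (List.replicate (k+1) '\\')])]) [] q 0
            simp only [List.replicate_zero, List.nil_append] at h
            simpa using h
          · rw [if_neg hsp]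
            simp only [List.foldl_cons, pvStepA, if_neg hc, if_neg hq, if_neg hsp]
            have h := ih comps ((buff ++ [String.ofList (List.replicate (k+1) '\\')]) ++ [String.ofList [c]]) q 0
            simp only [List.replicate_zero, List.nil_append] at h
            simpa using h

-- ===== VERDICT (by name: the statement is the Claim_ definition above) =====
theorem windows_shell_split_py_spec : Claim_equal_windows_shell_split_py := by
  intro s _ _
  unfold Spec_windows_shell_split_py windows_shell_split_py windows_shell_split_py_alt
  by_cases h : s.toList.isEmpty
  · simp [List.isEmpty_iff.mp h, pvGoB]
  · simpa [h] using pv_key s.toList [] [] false 0
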